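-- pv_equiv track=rewrite | github.com/finneyer/M-AI-ZE-Maize-diseases-detection | notebooks/raad.py | total_area
-- ===== SOURCE A (Python) =====
-- def calculate_area(box):
--     """Calculate the area of a bounding box."""
--     x1, y1, x2, y2 = box
--     return max(0, (x2 - x1)) * max(0, (y2 - y1))
--
-- def intersection_area(box1, box2):
--     """Calculate intersection area between two bounding boxes."""
--     x1 = max(box1[0], box2[0])
--     y1 = max(box1[1], box2[1])
--     x2 = min(box1[2], box2[2])
--     y2 = min(box1[3], box2[3])
--     return calculate_area((x1, y1, x2, y2))
--
-- def total_area(boxes):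
--     """Calculate total area considering overlaps."""
--     total = 0
--     for i, box1 in enumerate(boxes):
--         area = calculate_area(box1)
--         for j, box2 in enumerate(boxes):
--             if i != j:
--                 overlap = intersection_area(box1, box2)
--                 area -= overlap
--         total += max(0, area)
--     return total
-- ===== SOURCE B (Python) =====
-- def calculate_area(box):
--     """Calculate the area of a bounding box."""
--     x1, y1, x2, y2 = box
--     return max(0, (x2 - x1)) * max(0, (y2 - y1))
--
-- def intersection_area(box1, box2):
--     """Calculate intersection area between two bounding boxes."""
--     x1 = max(box1[0], box2[0])
--     y1 = max(box1[1], box2[1])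
--     x2 = min(box1[2], box2[2])
--     y2 = min(box1[3], box2[3])
--     return calculate_area((x1, y1, x2, y2))
--
-- def total_area(boxes):
--     """Calculate total area considering overlaps.
--
--     Single left-to-right pass keeping per-box running deltas: each
--     unordered pair of boxes is intersected exactly once (new box vs all
--     earlier boxes), and the overlap is subtracted from both running deltas.
--     """
--     acc = []  # list of [box, running_delta]
--     for b in boxes:
--         d0 = calculate_area(b)
--         for e in acc:
--             ov = intersection_area(e[0], b)
--             e[1] -= ov
--             d0 -= ov
--         acc.append([b, d0])
--     return sum(max(0, d) for _, d in acc)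
-- ===== Notes on version B (the rewrite author's own statement) =====
-- stated objective: faster
-- what changed: Instead of recomputing, for every box, its intersection with every other box (all n(n-1) ordered pairs), B makes one pass that keeps a running delta per box and intersects each new box once with each earlier box, subtracting the overlap from both deltas, so each unordered pair is computed once (constant-factor halving).
import Mathlib
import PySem

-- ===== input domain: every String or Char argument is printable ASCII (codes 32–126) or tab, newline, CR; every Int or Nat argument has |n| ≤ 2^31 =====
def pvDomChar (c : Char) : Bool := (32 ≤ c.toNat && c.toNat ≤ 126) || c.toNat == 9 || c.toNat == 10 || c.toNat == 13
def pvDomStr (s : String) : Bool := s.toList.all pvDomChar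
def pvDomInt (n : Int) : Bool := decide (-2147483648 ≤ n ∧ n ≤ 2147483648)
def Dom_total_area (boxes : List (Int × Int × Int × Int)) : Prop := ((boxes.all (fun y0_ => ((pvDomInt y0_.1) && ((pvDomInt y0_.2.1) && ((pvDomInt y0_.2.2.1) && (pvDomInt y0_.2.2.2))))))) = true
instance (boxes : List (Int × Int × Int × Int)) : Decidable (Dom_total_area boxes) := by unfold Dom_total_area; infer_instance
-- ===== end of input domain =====

-- B computes each pairwise intersection once (new box vs earlier boxes, updating running
-- per-box deltas) instead of A's full n(n-1) ordered-pair scan; return values are equal.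

-- ===== PORT A =====
def calculate_area (box : Int × Int × Int × Int) : Int :=
  max 0 (box.2.2.1 - box.1) * max 0 (box.2.2.2 - box.2.1)

def intersection_area (box1 box2 : Int × Int × Int × Int) : Int :=
  calculate_area (max box1.1 box2.1, max box1.2.1 box2.2.1,
                  min box1.2.2.1 box2.2.2.1, min box1.2.2.2 box2.2.2.2)

def total_area (boxes : List (Int × Int × Int × Int)) : Int :=
  (PySem.List.enumerate boxes).foldl (fun total p =>
    let area := (PySem.List.enumerate boxes).foldl
      (fun area q => if p.1 ≠ q.1 then area - intersection_area p.2 q.2 else area)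
      (calculate_area p.2)
    total + max 0 area) 0

-- ===== PORT B =====
-- inner loop of Source B: update every earlier (box, delta) pair and the new box's d0
def taStep (acc : List ((Int × Int × Int × Int) × Int)) (b : Int × Int × Int × Int) :
    List ((Int × Int × Int × Int) × Int) :=
  let r := acc.foldl (fun (st : List ((Int × Int × Int × Int) × Int) × Int) e =>
      let ov := intersection_area e.1 b
      (st.1 ++ [(e.1, e.2 - ov)], st.2 - ov)) ([], calculate_area b)
  r.1 ++ [(b, r.2)]

def total_area_alt (boxes : List (Int × Int × Int × Int)) : Int :=
  ((boxes.foldl taStep []).foldl (fun s e => s + max 0 e.2) 0)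

-- ===== PRECONDITION & SPEC =====
def Spec_total_area (boxes : List (Int × Int × Int × Int)) (out : Int) : Prop := out = total_area_alt boxes
instance (boxes : List (Int × Int × Int × Int)) (out : Int) : Decidable (Spec_total_area boxes out) := by unfold Spec_total_area; infer_instance

-- ===== CLAIM (what is proved, stated in full; the proofs are below) =====
def Claim_equal_total_area : Prop := ∀ (boxes : List (Int × Int × Int × Int)), Dom_total_area boxes → Spec_total_area boxes (total_area boxes)

-- ===== LEMMAS AND PROOFS =====

-- sum of intersections of b with every box of l
def ovSum (b : Int × Int × Int × Int) (l : List (Int × Int × Int × Int)) : Int :=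
  (l.map (intersection_area b)).sum

-- the per-box values both programs end up summing
def deltaPairs (l : List (Int × Int × Int × Int)) : List ((Int × Int × Int × Int) × Int) :=
  l.map (fun b => (b, calculate_area b + intersection_area b b - ovSum b l))

theorem intersection_area_comm (b c : Int × Int × Int × Int) :
    intersection_area b c = intersection_area c b := by
  simp [intersection_area, max_comm, min_comm]

theorem ovSum_append (b : Int × Int × Int × Int) (l : List (Int × Int × Int × Int)) (c) :
    ovSum b (l ++ [c]) = ovSum b l + intersection_area b c := by
  simp [ovSum]

-- characterisation of Source B's inner loop
theorem taStep_inner (b : Int × Int × Int × Int)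
    (acc : List ((Int × Int × Int × Int) × Int))
    (pre : List ((Int × Int × Int × Int) × Int)) (d : Int) :
    acc.foldl (fun (st : List ((Int × Int × Int × Int) × Int) × Int) e =>
        let ov := intersection_area e.1 b
        (st.1 ++ [(e.1, e.2 - ov)], st.2 - ov)) (pre, d)
    = (pre ++ acc.map (fun e => (e.1, e.2 - intersection_area e.1 b)),
       d - ovSum b (acc.map (·.1))) := by
  induction acc generalizing pre d with
  | nil => simp [ovSum]
  | cons e t ih =>
      simp only [List.foldl_cons, ih, ovSum, List.map_cons, List.sum_cons]
      rw [Prod.mk.injEq]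
      refine ⟨by simp, ?_⟩
      rw [intersection_area_comm b e.1]
      ring

theorem map_fst_deltaPairs (l : List (Int × Int × Int × Int)) :
    (deltaPairs l).map (·.1) = l := by
  simp [deltaPairs, List.map_map, Function.comp_def]

theorem taStep_eq (acc : List ((Int × Int × Int × Int) × Int)) (b : Int × Int × Int × Int) :
    taStep acc b
    = acc.map (fun e => (e.1, e.2 - intersection_area e.1 b))
      ++ [(b, calculate_area b - ovSum b (acc.map (·.1)))] := by
  simp only [taStep, taStep_inner]
  rw [List.nil_append]

theorem taStep_deltaPairs (l : List (Int × Int × Int × Int)) (b) :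
    taStep (deltaPairs l) b = deltaPairs (l ++ [b]) := by
  rw [taStep_eq, map_fst_deltaPairs]
  unfold deltaPairs
  rw [List.map_append, List.map_map]
  congr 1
  · apply List.map_congr_left
    intro c _
    simp only [Function.comp_apply]
    rw [Prod.mk.injEq]
    refine ⟨rfl, ?_⟩
    rw [ovSum_append, intersection_area_comm c b]
    ring
  · simp only [List.map_cons, List.map_nil]
    rw [ovSum_append]
    ring_nf

theorem foldl_taStep (l : List (Int × Int × Int × Int)) :
    l.foldl taStep [] = deltaPairs l := by
  induction l using List.reverseRecOn with
  | nil => simp [deltaPairs]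
  | append_singleton t b ih =>
      rw [List.foldl_append, List.foldl_cons, List.foldl_nil, ih, taStep_deltaPairs]

-- A's inner loop, in additive form: the sum skips exactly the self index
theorem enumSum_no_hit (b : Int × Int × Int × Int)
    (t : List (Int × Int × Int × Int)) (s i : Int) (h : i < s) :
    ((PySem.List.enumerate t s).map
        (fun q => if i ≠ q.1 then -(intersection_area b q.2) else 0)).sum
    = -(ovSum b t) := by
  induction t generalizing s with
  | nil => simp [ovSum]
  | cons c r ih =>
      rw [PySem.List.enumerate_cons]
      simp only [List.map_cons, List.sum_cons]
      rw [if_pos (by omega), ih (s + 1) (by omega)]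
      simp [ovSum]
      ring

theorem enumSum_hit (b : Int × Int × Int × Int)
    (l : List (Int × Int × Int × Int)) (s i : Int)
    (h : (i, b) ∈ PySem.List.enumerate l s) :
    ((PySem.List.enumerate l s).map
        (fun q => if i ≠ q.1 then -(intersection_area b q.2) else 0)).sum
    = intersection_area b b - ovSum b l := by
  induction l generalizing s with
  | nil => simp [PySem.List.enumerate_nil] at h
  | cons c r ih =>
      rw [PySem.List.enumerate_cons] at h ⊢
      simp only [List.map_cons, List.sum_cons]
      rcases List.mem_cons.mp h with h1 | h2
      · obtain ⟨hi, hb⟩ := Prod.ext_iff.mp h1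
        rw [if_neg (by omega)]
        rw [enumSum_no_hit b r (s + 1) i (by omega)]
        subst hb
        simp [ovSum]
      · have hi : s + 1 ≤ i := by
          rcases (PySem.List.mem_enumerate_iff ..).mp h2 with ⟨k, hk, hp⟩
          have : i = s + 1 + (k : Int) := congrArg Prod.fst hp
          omega
        rw [if_pos (by omega), ih (s + 1) h2]
        simp [ovSum]
        ring

-- A's inner fold computed: area of p.2 minus overlaps with all other indices
theorem inner_fold_eq (boxes : List (Int × Int × Int × Int)) (p : Int × (Int × Int × Int × Int))
    (hp : p ∈ PySem.List.enumerate boxes) :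
    (PySem.List.enumerate boxes).foldl
      (fun area q => if p.1 ≠ q.1 then area - intersection_area p.2 q.2 else area)
      (calculate_area p.2)
    = calculate_area p.2 + intersection_area p.2 p.2 - ovSum p.2 boxes := by
  have hcongr : (PySem.List.enumerate boxes).foldl
      (fun area q => if p.1 ≠ q.1 then area - intersection_area p.2 q.2 else area)
      (calculate_area p.2)
      = (PySem.List.enumerate boxes).foldl
      (fun area q => area + (if p.1 ≠ q.1 then -(intersection_area p.2 q.2) else 0))
      (calculate_area p.2) := by
    apply PySem.List.foldl_congr_mem
    intro acc q _
    by_cases hq : p.1 = q.1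
    · simp [hq]
    · simp [hq]
      ring
  rw [hcongr, PySem.List.foldl_add]
  have := enumSum_hit p.2 boxes 0 p.1 (by exact (Prod.mk.eta (p := p)) ▸ hp)
  rw [this]
  ring

-- ===== VERDICT (by name: the statement is the Claim_ definition above) =====
theorem total_area_spec : Claim_equal_total_area := by
  intro boxes _
  unfold Spec_total_area total_area total_area_alt
  rw [foldl_taStep]
  have hA : (PySem.List.enumerate boxes).foldl (fun total p =>
      let area := (PySem.List.enumerate boxes).foldl
        (fun area q => if p.1 ≠ q.1 then area - intersection_area p.2 q.2 else area)
        (calculate_area p.2)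
      total + max 0 area) 0
      = (PySem.List.enumerate boxes).foldl (fun total p =>
      total + max 0 (calculate_area p.2 + intersection_area p.2 p.2 - ovSum p.2 boxes)) 0 := by
    apply PySem.List.foldl_congr_mem
    intro acc p hp
    simp only []
    rw [inner_fold_eq boxes p hp]
  rw [hA, PySem.List.foldl_add, PySem.List.foldl_add]
  unfold deltaPairs
  rw [List.map_map]
  have : ((PySem.List.enumerate boxes).map
      (fun p => max 0 (calculate_area p.2 + intersection_area p.2 p.2 - ovSum p.2 boxes)))
      = boxes.map (fun b => max 0 (calculate_area b + intersection_area b b - ovSum b boxes)) := by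
    rw [← PySem.List.map_snd_enumerate boxes 0, List.map_map]
    simp [Function.comp_def]
  rw [this]
  rfl
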